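-- pv_equiv track=rewrite | github.com/AndyLee1024/agent-sdk | examples/terminal_agent/tui_parts/input_behavior.py | _find_inserted_segment
-- ===== SOURCE A (Python) =====
-- def _find_inserted_segment(
--     previous_text: str,
--     current_text: str,
-- ) -> tuple[int, int, str] | None:
--     if len(current_text) <= len(previous_text):
--         return None
--
--     prefix = 0
--     max_prefix = min(len(previous_text), len(current_text))
--     while (
--         prefix < max_prefix
--         and previous_text[prefix] == current_text[prefix]
--     ):
--         prefix += 1
--
--     previous_remaining = len(previous_text) - prefix
--     current_remaining = len(current_text) - prefix
--     suffix = 0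
--     max_suffix = min(previous_remaining, current_remaining)
--     while (
--         suffix < max_suffix
--         and previous_text[len(previous_text) - 1 - suffix]
--         == current_text[len(current_text) - 1 - suffix]
--     ):
--         suffix += 1
--
--     start = prefix
--     end = len(current_text) - suffix
--     if end <= start:
--         return None
--     return start, end, current_text[start:end]
-- ===== SOURCE B (Python) =====
-- def _largest_match(limit, matches):
--     """Largest k in [0, limit] with matches(k), assuming matches is downward
--     closed and matches(0) holds; found by binary search on k."""
--     lo, hi = 0, limit
--     while lo < hi:
--         mid = (lo + hi + 1) // 2
--         if matches(mid):
--             lo = mid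
--         else:
--             hi = mid - 1
--     return lo
--
--
-- def _find_inserted_segment(
--     previous_text: str,
--     current_text: str,
-- ) -> tuple[int, int, str] | None:
--     if len(current_text) <= len(previous_text):
--         return None
--     prefix = _largest_match(
--         len(previous_text),
--         lambda k: previous_text[:k] == current_text[:k],
--     )
--     suffix = _largest_match(
--         len(previous_text) - prefix,
--         lambda k: k == 0 or previous_text[-k:] == current_text[-k:],
--     )
--     end = len(current_text) - suffix
--     return prefix, end, current_text[prefix:end]
-- ===== Notes on version B (the rewrite author's own statement) =====
-- stated objective: alternative
-- what changed: Replaces A's two linear character-by-character while loops by binary search on the length of the matching prefix (resp. capped suffix), each probe testing a whole slice for equality, and drops A's end<=start guard, which is unreachable once len(current)>len(previous).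
import Mathlib
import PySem

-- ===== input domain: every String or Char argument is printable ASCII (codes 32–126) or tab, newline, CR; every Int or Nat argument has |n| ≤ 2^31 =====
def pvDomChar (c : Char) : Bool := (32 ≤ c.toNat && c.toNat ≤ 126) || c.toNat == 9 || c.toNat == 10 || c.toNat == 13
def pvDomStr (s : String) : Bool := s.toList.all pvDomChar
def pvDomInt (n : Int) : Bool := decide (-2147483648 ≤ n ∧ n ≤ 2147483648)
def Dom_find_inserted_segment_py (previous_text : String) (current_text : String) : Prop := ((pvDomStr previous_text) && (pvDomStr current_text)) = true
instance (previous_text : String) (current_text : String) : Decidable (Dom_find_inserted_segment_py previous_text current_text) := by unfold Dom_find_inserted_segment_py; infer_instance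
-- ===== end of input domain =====

-- B replaces A's two linear character-by-character while loops by binary search on the
-- length of the matching prefix/suffix, tested by whole-slice comparison (objective: alternative).

-- ===== PORT A =====
-- A's first while loop: index-based scan; the index is always in range when the condition is
-- checked (prefix < max_prefix ≤ both lengths), so getD is exact for Python's s[prefix] here.
def pvAPrefLoop (ps cs : List Char) (maxp : Nat) (pre : Nat) : Nat :=
  if pre < maxp ∧ ps.getD pre ' ' = cs.getD pre ' ' then pvAPrefLoop ps cs maxp (pre + 1) else pre
termination_by maxp - pre

-- A's second while loop: indices len-1-suffix are in range while suffix < max_suffix ≤ both lengths.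
def pvASufLoop (ps cs : List Char) (maxs : Nat) (suf : Nat) : Nat :=
  if suf < maxs ∧ ps.getD (ps.length - 1 - suf) ' ' = cs.getD (cs.length - 1 - suf) ' ' then
    pvASufLoop ps cs maxs (suf + 1)
  else suf
termination_by maxs - suf

def find_inserted_segment_py (previous_text : String) (current_text : String) :
    Option (Int × Int × String) :=
  let ps := previous_text.toList
  let cs := current_text.toList
  if cs.length ≤ ps.length then none
  else
    let pre := pvAPrefLoop ps cs (min ps.length cs.length) 0
    let suf := pvASufLoop ps cs (min (ps.length - pre) (cs.length - pre)) 0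
    let start := pre
    let e := cs.length - suf
    if e ≤ start then none
    else some ((start : Int), (e : Int),
      String.ofList (PySem.List.slice cs (some (start : Int)) (some (e : Int))))

-- ===== PORT B =====
-- Source B's _largest_match: binary search 'while lo < hi' on [0, limit].
def pvLargestLoop (ok : Nat → Bool) (lo hi : Nat) : Nat :=
  if lo < hi then
    let mid := (lo + hi + 1) / 2
    if ok mid then pvLargestLoop ok mid hi else pvLargestLoop ok lo (mid - 1)
  else lo
termination_by hi - lo
decreasing_by all_goals omega

def find_inserted_segment_py_alt (previous_text : String) (current_text : String) :
    Option (Int × Int × String) :=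
  let ps := previous_text.toList
  let cs := current_text.toList
  if cs.length ≤ ps.length then none
  else
    -- prev[:k] == cur[:k] is exactly take k for k ≥ 0
    let pre := pvLargestLoop (fun k => ps.take k == cs.take k) 0 ps.length
    -- prev[-k:] for k ≥ 1 is exactly drop (len - k): Python's negative-slice clamp at 0
    -- coincides with Nat truncated subtraction
    let suf := pvLargestLoop
      (fun k => k == 0 || (ps.drop (ps.length - k) == cs.drop (cs.length - k)))
      0 (ps.length - pre)
    let e := cs.length - suf
    some ((pre : Int), (e : Int),
      String.ofList (PySem.List.slice cs (some (pre : Int)) (some (e : Int))))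

-- ===== PRECONDITION & SPEC =====
def Spec_find_inserted_segment_py (previous_text : String) (current_text : String) (out : Option (Int × Int × String)) : Prop := out = find_inserted_segment_py_alt previous_text current_text
instance (previous_text : String) (current_text : String) (out : Option (Int × Int × String)) : Decidable (Spec_find_inserted_segment_py previous_text current_text out) := by unfold Spec_find_inserted_segment_py; infer_instance

-- ===== CLAIM =====
def Claim_equal_find_inserted_segment_py : Prop := ∀ (previous_text : String) (current_text : String), Dom_find_inserted_segment_py previous_text current_text → Spec_find_inserted_segment_py previous_text current_text (find_inserted_segment_py previous_text current_text)

-- ===== LEMMAS AND PROOFS =====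

-- Proof-side characterisation: the length of the common prefix of two lists, capped.
def pvCpl : List Char → List Char → Nat → Nat
  | x :: xs, y :: ys, cap => if cap = 0 ∨ x ≠ y then 0 else pvCpl xs ys (cap - 1) + 1
  | _, _, _ => 0

theorem pvCpl_le_cap (xs ys : List Char) (cap : Nat) : pvCpl xs ys cap ≤ cap := by
  induction xs generalizing ys cap with
  | nil => simp [pvCpl]
  | cons x xs ih =>
    cases ys with
    | nil => simp [pvCpl]
    | cons y ys =>
      simp only [pvCpl]
      split
      · omega
      · have := ih ys (cap - 1)
        omega

theorem pvCpl_zero (xs ys : List Char) : pvCpl xs ys 0 = 0 := by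
  cases xs with
  | nil => rfl
  | cons x xs => cases ys with
    | nil => rfl
    | cons y ys => simp [pvCpl]

theorem pvAPrefLoop_eq (ps cs : List Char) (m i : Nat) (hp : m ≤ ps.length)
    (hc : m ≤ cs.length) (hi : i ≤ m) :
    pvAPrefLoop ps cs m i = i + pvCpl (ps.drop i) (cs.drop i) (m - i) := by
  induction hfuel : m - i generalizing i with
  | zero =>
    rw [pvAPrefLoop]
    rw [if_neg (by omega), pvCpl_zero]; omega
  | succ n ih =>
    have him : i < m := by omega
    have hip : i < ps.length := by omega
    have hic : i < cs.length := by omega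
    rw [pvAPrefLoop]
    rw [List.drop_eq_getElem_cons hip, List.drop_eq_getElem_cons hic]
    simp only [pvCpl]
    have hgd : ps.getD i ' ' = ps[i] := List.getD_eq_getElem ps ' ' hip
    have hgc : cs.getD i ' ' = cs[i] := List.getD_eq_getElem cs ' ' hic
    by_cases heq : ps[i] = cs[i]
    · rw [if_pos ⟨him, by rw [hgd, hgc, heq]⟩]
      rw [ih (i + 1) (by omega) (by omega)]
      rw [if_neg (by push Not; exact ⟨by omega, heq⟩)]
      simp only [Nat.add_sub_cancel]
      omega
    · rw [if_neg (by intro ⟨_, h⟩; rw [hgd, hgc] at h; exact heq h)]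
      rw [if_pos (Or.inr heq)]; omega

theorem pvASufLoop_eq (ps cs : List Char) (m s : Nat) (hp : m ≤ ps.length)
    (hc : m ≤ cs.length) (hs : s ≤ m) :
    pvASufLoop ps cs m s = s + pvCpl (ps.reverse.drop s) (cs.reverse.drop s) (m - s) := by
  induction hfuel : m - s generalizing s with
  | zero =>
    rw [pvASufLoop]
    rw [if_neg (by omega), pvCpl_zero]; omega
  | succ n ih =>
    have hsm : s < m := by omega
    have hsp : s < ps.length := by omega
    have hsc : s < cs.length := by omega
    have hsp' : s < ps.reverse.length := by simpa using hsp
    have hsc' : s < cs.reverse.length := by simpa using hsc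
    rw [pvASufLoop]
    rw [List.drop_eq_getElem_cons hsp', List.drop_eq_getElem_cons hsc']
    simp only [pvCpl]
    have hrp : ps.reverse[s] = ps[ps.length - 1 - s] := by rw [List.getElem_reverse]
    have hrc : cs.reverse[s] = cs[cs.length - 1 - s] := by rw [List.getElem_reverse]
    have hgd : ps.getD (ps.length - 1 - s) ' ' = ps[ps.length - 1 - s] :=
      List.getD_eq_getElem ps ' ' (by omega)
    have hgc : cs.getD (cs.length - 1 - s) ' ' = cs[cs.length - 1 - s] :=
      List.getD_eq_getElem cs ' ' (by omega)
    by_cases heq : ps.reverse[s] = cs.reverse[s]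
    · rw [if_pos ⟨hsm, by rw [hgd, hgc, ← hrp, ← hrc, heq]⟩]
      rw [ih (s + 1) (by omega) (by omega)]
      rw [if_neg (by push Not; exact ⟨by omega, heq⟩)]
      simp only [Nat.add_sub_cancel]
      omega
    · rw [if_neg (by intro ⟨_, h⟩; rw [hgd, hgc, ← hrp, ← hrc] at h; exact heq h)]
      rw [if_pos (Or.inr heq)]; omega

-- take-equality of length k holds exactly when k is at most the capped common-prefix length
theorem take_eq_iff_le_cpl (ps : List Char) : ∀ (cs : List Char) (cap k : Nat), k ≤ cap →
    cap ≤ ps.length → cap ≤ cs.length → ((ps.take k = cs.take k) ↔ k ≤ pvCpl ps cs cap) := by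
  induction ps with
  | nil => intro cs cap k hk hp _; simp at hp; simp [show k = 0 by omega]
  | cons x xs ih =>
    intro cs cap k hk hp hc
    cases cs with
    | nil => simp at hc; simp [show k = 0 by omega, pvCpl_zero, show cap = 0 by omega]
    | cons y ys =>
      cases k with
      | zero => simp
      | succ k' =>
        have hcap : cap ≠ 0 := by omega
        simp only [List.take_succ_cons, pvCpl]
        by_cases heq : x = y
        · rw [if_neg (by simp [hcap, heq])]
          have hp' : cap - 1 ≤ xs.length := by simp at hp; omega
          have hc' : cap - 1 ≤ ys.length := by simp at hc; omega
          have := ih ys (cap - 1) k' (by omega) hp' hc'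
          constructor
          · intro h; injection h with _ h2; have := this.mp h2; omega
          · intro h; rw [heq, this.mpr (by omega)]
        · rw [if_pos (Or.inr heq)]
          constructor
          · intro h; injection h with h1 _; exact absurd h1 heq
          · omega

-- binary search returns N when ok is true exactly on [lo, N] within [lo, hi]
theorem pvLargestLoop_spec (ok : Nat → Bool) :
    ∀ (fuel lo hi N : Nat), hi - lo ≤ fuel → lo ≤ N → N ≤ hi →
    (∀ k, lo ≤ k → k ≤ hi → (ok k = true ↔ k ≤ N)) → pvLargestLoop ok lo hi = N := by
  intro fuel
  induction fuel with
  | zero =>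
    intro lo hi N hf h1 h2 _
    rw [pvLargestLoop, if_neg (by omega)]; omega
  | succ n ih =>
    intro lo hi N hf h1 h2 hok
    rw [pvLargestLoop]
    by_cases hlt : lo < hi
    · rw [if_pos hlt]
      by_cases hmid : ok ((lo + hi + 1) / 2) = true
      · simp only [hmid, if_true]
        have hle : (lo + hi + 1) / 2 ≤ N := (hok _ (by omega) (by omega)).mp hmid
        exact ih _ hi N (by omega) hle h2 (fun k hk1 hk2 => hok k (by omega) hk2)
      · simp only [hmid]
        have hgt : ¬ ((lo + hi + 1) / 2 ≤ N) := fun h => hmid ((hok _ (by omega) (by omega)).mpr h)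
        exact ih lo _ N (by omega) h1 (by omega) (fun k hk1 hk2 => hok k hk1 (by omega))
    · rw [if_neg hlt]; omega

-- ===== VERDICT =====
theorem find_inserted_segment_py_spec : Claim_equal_find_inserted_segment_py := by
  intro prev cur _
  unfold Spec_find_inserted_segment_py find_inserted_segment_py find_inserted_segment_py_alt
  set ps := prev.toList
  set cs := cur.toList
  by_cases hlen : cs.length ≤ ps.length
  · simp [hlen]
  · simp only [if_neg hlen]
    have hlt : ps.length < cs.length := by omega
    set N1 := pvCpl ps cs ps.length with hN1def
    have hN1 : N1 ≤ ps.length := pvCpl_le_cap ps cs ps.length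
    have hApre : pvAPrefLoop ps cs (min ps.length cs.length) 0 = N1 := by
      rw [show min ps.length cs.length = ps.length by omega,
        pvAPrefLoop_eq ps cs ps.length 0 (le_refl _) (by omega) (by omega)]
      simp [hN1def]
    have hBpre : pvLargestLoop (fun k => ps.take k == cs.take k) 0 ps.length = N1 := by
      apply pvLargestLoop_spec _ ps.length 0 ps.length N1 (by omega) (by omega) hN1
      intro k _ hk2
      simpa using take_eq_iff_le_cpl ps cs ps.length k hk2 (le_refl _) (by omega)
    rw [hApre, hBpre]
    set cap := ps.length - N1 with hcapdef
    set N2 := pvCpl ps.reverse cs.reverse cap with hN2def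
    have hN2 : N2 ≤ cap := pvCpl_le_cap _ _ _
    have hAsuf : pvASufLoop ps cs (min (ps.length - N1) (cs.length - N1)) 0 = N2 := by
      rw [show min (ps.length - N1) (cs.length - N1) = cap by omega,
        pvASufLoop_eq ps cs cap 0 (by omega) (by omega) (by omega)]
      simp [hN2def]
    have hBsuf : pvLargestLoop
        (fun k => k == 0 || (ps.drop (ps.length - k) == cs.drop (cs.length - k))) 0 cap = N2 := by
      apply pvLargestLoop_spec _ cap 0 cap N2 (by omega) (by omega) hN2
      intro k _ hk2
      cases k with
      | zero => simp
      | succ k' =>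
        have hkp : k' + 1 ≤ ps.length := by omega
        have hkc : k' + 1 ≤ cs.length := by omega
        have hdp : ps.drop (ps.length - (k' + 1)) = (ps.reverse.take (k' + 1)).reverse := by
          rw [List.take_reverse]; simp
        have hdc : cs.drop (cs.length - (k' + 1)) = (cs.reverse.take (k' + 1)).reverse := by
          rw [List.take_reverse]; simp
        have hiff := take_eq_iff_le_cpl ps.reverse cs.reverse cap (k' + 1) hk2
          (by simpa using by omega) (by simpa using by omega)
        simp only [hdp, hdc, ← hN2def] at *
        simpa using hiff
    rw [hAsuf, hBsuf]
    rw [if_neg (by omega)]
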